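-- pv_equiv track=rewrite | github.com/bjedwards/python_lib | graph_comparison/models/HOT.py | remove_dom
-- ===== SOURCE A (Python) =====
-- import copy
--
-- def remove_dom(score_vec,cand,s_i):
--     cand_rem = copy.copy(cand)
--     for i in cand:
--         for j in cand:
--             n = 0
--             m = 0
--             for x in range(len(s_i)):
--                 if score_vec[i][x] >= score_vec[j][x]:
--                     n += 1
--                 if score_vec[i][x] > score_vec[j][x]:
--                     m += 1
--             if n == len(s_i) and m > 0:
--                 try:
--                     cand_rem.remove(j)
--                 except:
--                     pass
--     return cand_rem
-- ===== SOURCE B (Python) =====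
-- def remove_dom(score_vec, cand, s_i):
--     k = len(s_i)
--
--     def score(v):
--         return tuple(score_vec[v][x] for x in range(k))
--
--     # Distinct score tuples in lexicographically descending order: a strict
--     # dominator of a tuple is componentwise >= and unequal, hence strictly
--     # lex-greater, so every dominator appears earlier in this order.  Scan once,
--     # keeping the Pareto front built so far: a tuple is dominated by something
--     # iff it is dominated by a front member (dominance is transitive).
--     front = []
--     for t in sorted({score(v) for v in cand}, reverse=True):
--         # front tuples are lex-greater than t and distinct from it, so a
--         # componentwise >= front member strictly dominates t
--         if not any(all(u[x] >= t[x] for x in range(k)) for u in front):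
--             front.append(t)
--     keep = set(front)
--     return [v for v in cand if score(v) in keep]
-- ===== Notes on version B (the rewrite author's own statement) =====
-- stated objective: alternative
-- what changed: B precomputes each candidate's score tuple, sorts the distinct tuples lexicographically descending (so every dominator precedes what it dominates), builds the Pareto front in a single scan that compares each tuple only against current front members, and filters cand once against the front set - instead of A's all-pairs count loops with repeated list.remove on a mutated copy.
import Mathlib
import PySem

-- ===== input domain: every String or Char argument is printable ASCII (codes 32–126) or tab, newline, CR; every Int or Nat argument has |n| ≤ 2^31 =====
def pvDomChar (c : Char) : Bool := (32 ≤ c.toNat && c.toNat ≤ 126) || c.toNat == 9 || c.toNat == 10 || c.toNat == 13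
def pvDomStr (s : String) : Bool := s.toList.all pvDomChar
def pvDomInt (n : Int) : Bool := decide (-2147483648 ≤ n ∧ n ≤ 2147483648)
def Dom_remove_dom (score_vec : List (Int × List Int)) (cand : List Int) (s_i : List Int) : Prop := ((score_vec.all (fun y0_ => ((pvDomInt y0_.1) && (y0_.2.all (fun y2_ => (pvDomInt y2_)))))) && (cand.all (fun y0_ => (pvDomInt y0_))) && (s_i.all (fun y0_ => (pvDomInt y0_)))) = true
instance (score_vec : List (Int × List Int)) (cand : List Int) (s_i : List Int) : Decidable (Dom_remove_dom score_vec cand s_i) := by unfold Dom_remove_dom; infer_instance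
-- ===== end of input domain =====

-- B sorts the distinct score tuples lexicographically descending and builds the Pareto
-- front in one scan (a dominator is always lex-greater, so it precedes what it dominates),
-- then filters cand once against the front — a sort-and-front-scan algorithm instead of
-- A's pairwise count-loops with repeated list.remove on a mutated copy (alternative).


-- ===== PORT A =====
-- score_vec[i][x] >= score_vec[j][x]: score_vec is a dict keyed by candidate, so score_vec[i]
-- is a first-match key lookup and [x] (x = 0,1,... from range(len(s_i))) indexes the value list.
-- A missing key (KeyError) or a too-short value list (IndexError) raises in Python — excluded
-- by Pre_; the port returns false there.
def coordGe (sv : List (Int × List Int)) (i j x : Int) : Bool :=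
  match List.lookup i sv, List.lookup j sv with
  | some p, some q =>
    match PySem.List.pyGet? p x, PySem.List.pyGet? q x with
    | some a, some b => decide (b ≤ a)
    | _, _ => false
  | _, _ => false

-- score_vec[i][x] > score_vec[j][x], same conventions as coordGe.
def coordGt (sv : List (Int × List Int)) (i j x : Int) : Bool :=
  match List.lookup i sv, List.lookup j sv with
  | some p, some q =>
    match PySem.List.pyGet? p x, PySem.List.pyGet? q x with
    | some a, some b => decide (b < a)
    | _, _ => false
  | _, _ => false

def remove_dom (score_vec : List (Int × List Int)) (cand : List Int) (s_i : List Int) : List Int :=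
  cand.foldl (fun cand_rem i =>
    cand.foldl (fun cr j =>
      let nm := (PySem.List.pyRange 0 (s_i.length : Int) 1).foldl
        (fun (nm : Int × Int) x =>
          (if coordGe score_vec i j x then nm.1 + 1 else nm.1,
           if coordGt score_vec i j x then nm.2 + 1 else nm.2)) (0, 0)
      if nm.1 = (s_i.length : Int) ∧ 0 < nm.2 then (PySem.List.remove? cr j).getD cr else cr)
      cand_rem)
    cand

-- ===== PORT B =====
-- score(v) = tuple(score_vec[v][x] for x in range(k)): dict lookup then index; inside Pre_
-- the lookup succeeds and every index is in range, so the .getD defaults are never used.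
def scoreOf (sv : List (Int × List Int)) (k : Int) (v : Int) : List Int :=
  (PySem.List.pyRange 0 k 1).map
    (fun x => (PySem.List.pyGet? ((List.lookup v sv).getD []) x).getD 0)

-- all(u[x] >= t[x] for x in range(k)); u and t are score tuples of length k, so the
-- .getD defaults are never used.
def cgeB (k : Int) (u t : List Int) : Bool :=
  (PySem.List.pyRange 0 k 1).all
    (fun x => decide ((PySem.List.pyGet? t x).getD 0 ≤ (PySem.List.pyGet? u x).getD 0))

def remove_dom_alt (score_vec : List (Int × List Int)) (cand : List Int) (s_i : List Int) : List Int :=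
  let k : Int := (s_i.length : Int)
  let front : List (List Int) :=
    (PySem.List.sorted (PySem.Set.ofList (cand.map (fun v => scoreOf score_vec k v)))
        (fun t => t) true).foldl
      (fun f t => if f.any (fun u => cgeB k u t) then f else f ++ [t]) []
  let keep : PySem.Set (List Int) := PySem.Set.ofList front
  cand.filter (fun v => PySem.Set.contains keep (scoreOf score_vec k v))

-- ===== PRECONDITION & SPEC =====
-- Exactly the inputs where Python A returns normally: either the comparison loops never run
-- (cand or s_i empty), or every candidate is a key of the score_vec dict whose value list has
-- at least len(s_i) entries (otherwise score_vec[i] is a KeyError or score_vec[i][x] an IndexError).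
def Pre_remove_dom (score_vec : List (Int × List Int)) (cand : List Int) (s_i : List Int) : Prop :=
  cand = [] ∨ s_i = [] ∨
    (cand.all (fun i => ((List.lookup i score_vec).map
        (fun v => decide (s_i.length ≤ List.length v))).getD false)) = true
instance (score_vec : List (Int × List Int)) (cand : List Int) (s_i : List Int) : Decidable (Pre_remove_dom score_vec cand s_i) := by unfold Pre_remove_dom; infer_instance

def pvWitness_remove_dom : (List (Int × List Int)) × List Int × List Int :=
  ([(0, [3, 1]), (1, [1, 0]), (2, [2, 5])], [0, 1, 2], [0, 0])

def Spec_remove_dom (score_vec : List (Int × List Int)) (cand : List Int) (s_i : List Int) (out : List Int) : Prop := out = remove_dom_alt score_vec cand s_i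
instance (score_vec : List (Int × List Int)) (cand : List Int) (s_i : List Int) (out : List Int) : Decidable (Spec_remove_dom score_vec cand s_i out) := by unfold Spec_remove_dom; infer_instance

-- ===== CLAIM (what is proved, stated in full; the proofs are below) =====
def Claim_equal_remove_dom : Prop := ∀ (score_vec : List (Int × List Int)) (cand : List Int) (s_i : List Int), Dom_remove_dom score_vec cand s_i → Pre_remove_dom score_vec cand s_i → Spec_remove_dom score_vec cand s_i (remove_dom score_vec cand s_i)

-- ===== LEMMAS AND PROOFS =====

-- ---- A-side: remove_dom is 'filter out everything dominated by someone in cand' ----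

-- dominance as A computes it: all coordinates >= and some coordinate >
def dominatesA (sv : List (Int × List Int)) (s_i : List Int) (i j : Int) : Bool :=
  ((PySem.List.pyRange 0 (s_i.length : Int) 1).all (fun x => coordGe sv i j x)) &&
  ((PySem.List.pyRange 0 (s_i.length : Int) 1).any (fun x => coordGt sv i j x))

theorem count_pair_foldl (p q : Int → Bool) (L : List Int) (a b : Int) :
    L.foldl (fun (nm : Int × Int) x =>
        (if p x then nm.1 + 1 else nm.1, if q x then nm.2 + 1 else nm.2)) (a, b)
      = (a + L.countP p, b + L.countP q) := by
  induction L generalizing a b with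
  | nil => simp
  | cons x L ih =>
    simp only [List.foldl_cons, List.countP_cons, ih]
    by_cases hp : p x <;> by_cases hq : q x <;>
      simp only [hp, hq, if_true, Prod.mk.injEq] <;>
      constructor <;> push_cast <;> ring

theorem cond_iff_dominates (sv : List (Int × List Int)) (s_i : List Int) (i j : Int) :
    (((PySem.List.pyRange 0 (s_i.length : Int) 1).foldl
        (fun (nm : Int × Int) x =>
          (if coordGe sv i j x then nm.1 + 1 else nm.1,
           if coordGt sv i j x then nm.2 + 1 else nm.2)) (0, 0)).1 = (s_i.length : Int) ∧
      0 < ((PySem.List.pyRange 0 (s_i.length : Int) 1).foldl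
        (fun (nm : Int × Int) x =>
          (if coordGe sv i j x then nm.1 + 1 else nm.1,
           if coordGt sv i j x then nm.2 + 1 else nm.2)) (0, 0)).2)
      ↔ dominatesA sv s_i i j = true := by
  rw [count_pair_foldl]
  have hlen : (PySem.List.pyRange 0 (s_i.length : Int) 1).length = s_i.length := by
    rw [PySem.List.length_pyRange_one]; omega
  unfold dominatesA
  rw [Bool.and_eq_true, List.all_eq_true, List.any_eq_true]
  constructor
  · rintro ⟨h1, h2⟩
    exact ⟨List.countP_eq_length.mp (by omega), List.countP_pos_iff.mp (by omega)⟩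
  · rintro ⟨hall, hany⟩
    have h1 := List.countP_eq_length.mpr hall
    have h2 := List.countP_pos_iff.mpr hany
    exact ⟨by omega, by omega⟩

theorem filter_erase_of_neg (p : Int → Bool) (j : Int) (l : List Int) (h : p j = false) :
    (l.erase j).filter p = l.filter p := by
  induction l with
  | nil => simp
  | cons a l ih =>
    by_cases ha : a = j
    · subst ha; simp [List.erase_cons_head, h]
    · rw [List.erase_cons_tail (by simp [ha])]
      by_cases hp : p a <;> simp [hp, ih]

theorem inner_pass (dom : Int → Bool) (Q : List Int) :
    ∀ (r : List Int), (∀ v, dom v = true → r.count v ≤ Q.count v) →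
    Q.foldl (fun cr j => if dom j then (PySem.List.remove? cr j).getD cr else cr) r
      = r.filter (fun v => !dom v) := by
  induction Q with
  | nil =>
    intro r H
    simp only [List.foldl_nil]
    symm
    apply List.filter_eq_self.mpr
    intro a ha
    by_contra hcon
    have hd : dom a = true := by revert hcon; cases dom a <;> simp
    have := H a hd
    simp [List.count_eq_zero] at this
    exact this ha
  | cons j Q ih =>
    intro r H
    simp only [List.foldl_cons]
    by_cases hj : dom j = true
    · rw [if_pos hj]
      by_cases hmem : j ∈ r
      · rw [PySem.List.remove?_eq_some_erase r j hmem, Option.getD_some]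
        rw [ih (r.erase j) ?_, filter_erase_of_neg _ _ _ (by simp [hj])]
        intro v hv
        by_cases hvj : v = j
        · subst hvj
          have := H v hv
          rw [List.count_erase_self]
          simp [List.count_cons_self] at this ⊢
          omega
        · rw [List.count_erase_of_ne hvj]
          have := H v hv
          rw [List.count_cons_of_ne (Ne.symm hvj)] at this
          exact this
      · rw [(PySem.List.remove?_eq_none_iff r j).mpr hmem, Option.getD_none]
        apply ih
        intro v hv
        have := H v hv
        by_cases hvj : v = j
        · subst hvj
          simp [List.count_eq_zero.mpr hmem]
        · rw [List.count_cons_of_ne (Ne.symm hvj)] at this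
          exact this
    · rw [if_neg hj]
      apply ih
      intro v hv
      have := H v hv
      have hvj : v ≠ j := fun he => hj (he ▸ hv)
      rw [List.count_cons_of_ne (Ne.symm hvj)] at this
      exact this

theorem outer_pass (dom : Int → Int → Bool) (cand : List Int) :
    ∀ (P : List Int) (p : Int → Bool),
    P.foldl (fun r i =>
        cand.foldl (fun cr j => if dom i j then (PySem.List.remove? cr j).getD cr else cr) r)
      (cand.filter p)
      = cand.filter (fun v => p v && !(P.any (fun i => dom i v))) := by
  intro P
  induction P with
  | nil => intro p; simp
  | cons i P ih =>
    intro p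
    simp only [List.foldl_cons]
    rw [inner_pass (dom i) cand (cand.filter p)
        (fun v _ => List.Sublist.count_le v List.filter_sublist)]
    rw [List.filter_filter]
    rw [ih (fun v => !dom i v && p v)]
    apply List.filter_congr
    intro v _
    cases h1 : p v <;> cases h2 : dom i v <;> simp [h2, List.any_cons]

theorem a_eq_filter (sv : List (Int × List Int)) (cand : List Int) (s_i : List Int) :
    remove_dom sv cand s_i
      = cand.filter (fun v => !(cand.any (fun i => dominatesA sv s_i i v))) := by
  unfold remove_dom
  have h1 : ∀ (i : Int) (cr : List Int) (j : Int),
      (if ((PySem.List.pyRange 0 (s_i.length : Int) 1).foldl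
            (fun (nm : Int × Int) x =>
              (if coordGe sv i j x then nm.1 + 1 else nm.1,
               if coordGt sv i j x then nm.2 + 1 else nm.2)) (0, 0)).1 = (s_i.length : Int) ∧
          0 < ((PySem.List.pyRange 0 (s_i.length : Int) 1).foldl
            (fun (nm : Int × Int) x =>
              (if coordGe sv i j x then nm.1 + 1 else nm.1,
               if coordGt sv i j x then nm.2 + 1 else nm.2)) (0, 0)).2
        then (PySem.List.remove? cr j).getD cr else cr)
      = if dominatesA sv s_i i j then (PySem.List.remove? cr j).getD cr else cr := by
    intro i cr j
    by_cases h : dominatesA sv s_i i j = true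
    · rw [if_pos ((cond_iff_dominates sv s_i i j).mpr h), if_pos h]
    · rw [if_neg (fun hc => h ((cond_iff_dominates sv s_i i j).mp hc)), if_neg h]
  simp only [h1]
  have ho := outer_pass (dominatesA sv s_i) cand cand (fun _ => true)
  simp only [List.filter_true] at ho
  rw [ho]
  apply List.filter_congr
  intro v _
  simp

-- ---- B-side: the sorted front scan keeps exactly the undominated score tuples ----

theorem length_scoreOf (sv : List (Int × List Int)) (n : Nat) (v : Int) :
    (scoreOf sv (n : Int) v).length = n := by
  simp [scoreOf, PySem.List.length_pyRange_one]

theorem cge_trans (k : Int) (u t s : List Int) (h1 : cgeB k u t = true)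
    (h2 : cgeB k t s = true) : cgeB k u s = true := by
  simp only [cgeB, List.all_eq_true, decide_eq_true_eq] at *
  intro x hx
  exact le_trans (h2 x hx) (h1 x hx)

-- pointwise form of cgeB on casts

theorem cgeB_iff (n : Nat) (u t : List Int) :
    cgeB (n : Int) u t = true ↔ ∀ j < n, t.getD j 0 ≤ u.getD j 0 := by
  simp only [cgeB, PySem.List.pyRange_zero_nat, List.all_map, List.all_eq_true,
    Function.comp, List.mem_range, PySem.List.pyGet?_natCast, decide_eq_true_eq]
  constructor
  · intro h j hj; simpa [List.getD] using h j hj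
  · intro h j hj; simpa [List.getD] using h j hj

theorem lt_of_pointwise : ∀ (u t : List Int), u.length = t.length →
    (∀ j < u.length, t.getD j 0 ≤ u.getD j 0) → u ≠ t → t < u := by
  intro u
  induction u with
  | nil => intro t hl _ hne; cases t <;> simp_all
  | cons a u ih =>
    intro t hl hp hne
    cases t with
    | nil => simp at hl
    | cons b t =>
      have hba : b ≤ a := by simpa using hp 0 (by simp)
      rw [List.cons_lt_cons_iff]
      rcases lt_or_eq_of_le hba with h | h
      · exact Or.inl h
      · subst h
        refine Or.inr ⟨rfl, ih t (by simpa using hl) ?_ ?_⟩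
        · intro j hj; simpa using hp (j+1) (by simpa)
        · intro he; exact hne (by rw [he])

theorem cge_lt (n : Nat) (u t : List Int) (hu : u.length = n) (ht : t.length = n)
    (h : cgeB (n : Int) u t = true) (hne : u ≠ t) : t < u :=
  lt_of_pointwise u t (by omega) (fun j hj => (cgeB_iff n u t).mp h j (by omega)) hne

theorem front_fold (n : Nat) (S : List (List Int)) :
    ∀ (f : List (List Int)),
    S.Pairwise (fun a b => b < a) →
    (∀ t ∈ S, t.length = n) →
    (∀ u ∈ f, ∀ t ∈ S, t < u) →
    S.foldl (fun f t => if f.any (fun u => cgeB (n : Int) u t) then f else f ++ [t]) f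
      = f ++ S.filter (fun t => !(f.any (fun u => cgeB (n : Int) u t))
            && !(S.any (fun u => cgeB (n : Int) u t && decide (u ≠ t)))) := by
  induction S with
  | nil => intro f _ _ _; simp
  | cons t S ih =>
    intro f hpw hlen hf
    rw [List.pairwise_cons] at hpw
    obtain ⟨hts, hpw'⟩ := hpw
    simp only [List.foldl_cons]
    by_cases hd : f.any (fun u => cgeB (n : Int) u t) = true
    · -- t is dominated by a front member: it is dropped
      rw [if_pos hd]
      rw [ih f hpw' (fun s hs => hlen s (List.mem_cons_of_mem _ hs))
          (fun u hu s hs => hf u hu s (List.mem_cons_of_mem _ hs))]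
      congr 1
      rw [List.filter_cons_of_neg (by simp [hd])]
      apply List.filter_congr
      intro s hs
      by_cases hts' : (cgeB (n : Int) t s && decide (t ≠ s)) = true
      · -- t dominates s, but then so does t's dominator in f
        obtain ⟨u, hu, hut⟩ := List.any_eq_true.mp hd
        have hus : cgeB (n : Int) u s = true :=
          cge_trans _ u t s hut (by exact (Bool.and_eq_true ..).mp hts' |>.1)
        have : f.any (fun u => cgeB (n : Int) u s) = true := List.any_eq_true.mpr ⟨u, hu, hus⟩
        simp [this]
      · simp only [List.any_cons, hts']
        simp
    · -- t joins the front
      rw [if_neg hd]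
      have hf' : ∀ u ∈ f ++ [t], ∀ s ∈ S, s < u := by
        intro u hu s hs
        rcases List.mem_append.mp hu with h | h
        · exact hf u h s (List.mem_cons_of_mem _ hs)
        · rw [List.mem_singleton.mp h]; exact hts s hs
      rw [ih (f ++ [t]) hpw' (fun s hs => hlen s (List.mem_cons_of_mem _ hs)) hf']
      -- t itself survives the filter
      have hkeep : (!(f.any (fun u => cgeB (n : Int) u t))
          && !((t :: S).any (fun u => cgeB (n : Int) u t && decide (u ≠ t)))) = true := by
        simp only [Bool.and_eq_true, Bool.not_eq_true', List.any_cons]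
        refine ⟨by simpa using hd, ?_⟩
        simp only [Bool.or_eq_false_iff]
        constructor
        · simp
        · rw [List.any_eq_false]
          intro s hs
          by_cases hc : cgeB (n : Int) s t = true
          · -- s would be a strict dominator, hence lex-greater: contradiction with s < t
            have hne : s ≠ t := ne_of_lt (hts s hs)
            have := cge_lt n s t (hlen s (List.mem_cons_of_mem _ hs)) (hlen t (List.mem_cons_self))
              hc hne
            exact absurd (hts s hs) (lt_asymm this)
          · rw [Bool.not_eq_true] at hc
            simp [hc]
      conv_rhs => rw [List.filter_cons]
      rw [if_pos hkeep, List.append_assoc, List.singleton_append]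
      congr 2
      apply List.filter_congr
      intro s hs
      have hst : t ≠ s := (ne_of_lt (hts s hs)).symm
      simp only [List.any_append, List.any_cons, List.any_nil, Bool.or_false]
      cases h1 : f.any (fun u => cgeB (n : Int) u s) <;>
        cases h2 : cgeB (n : Int) t s <;>
        cases h3 : S.any (fun u => cgeB (n : Int) u s && decide (u ≠ s)) <;> simp [hst]

theorem b_eq_filter (sv : List (Int × List Int)) (cand : List Int) (s_i : List Int) :
    remove_dom_alt sv cand s_i
      = cand.filter (fun v => !(cand.any (fun i =>
          cgeB (s_i.length : Int) (scoreOf sv (s_i.length : Int) i) (scoreOf sv (s_i.length : Int) v)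
            && decide (scoreOf sv (s_i.length : Int) i ≠ scoreOf sv (s_i.length : Int) v)))) := by
  unfold remove_dom_alt
  simp only []
  set n := s_i.length with hn
  set S := PySem.List.sorted (PySem.Set.ofList (cand.map (fun v => scoreOf sv (n : Int) v)))
      (fun t => t) true with hS
  have hperm : S.Perm (PySem.Set.ofList (cand.map (fun v => scoreOf sv (n : Int) v))) :=
    PySem.List.sorted_perm _ _ _
  have hmemS : ∀ x, x ∈ S ↔ ∃ v ∈ cand, scoreOf sv (n : Int) v = x := by
    intro x
    rw [hperm.mem_iff, PySem.Set.mem_ofList, List.mem_map]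
  have hnodup : S.Nodup := hperm.nodup_iff.mpr (PySem.Set.nodup_ofList _)
  have hpw : S.Pairwise (fun a b => b < a) := by
    have h1 : S.Pairwise (fun a b : List Int => b ≤ a) := by
      have := PySem.List.sorted_pairwise_rev
        (PySem.Set.ofList (cand.map (fun v => scoreOf sv (n : Int) v))) (fun t : List Int => t)
      rw [hS]
      convert this using 2
    exact (h1.and hnodup).imp (fun h => lt_of_le_of_ne h.1 (Ne.symm h.2))
  have hlen : ∀ t ∈ S, t.length = n := by
    intro t ht
    obtain ⟨v, _, hv⟩ := (hmemS t).mp ht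
    rw [← hv, length_scoreOf]
  rw [front_fold n S [] hpw hlen (by simp)]
  simp only [List.any_nil, Bool.not_false, Bool.true_and, List.nil_append]
  apply List.filter_congr
  intro v hv
  rw [Bool.eq_iff_iff, PySem.Set.contains_iff, PySem.Set.mem_ofList, List.mem_filter]
  have hvS : scoreOf sv (n : Int) v ∈ S := (hmemS _).mpr ⟨v, hv, rfl⟩
  simp only [hvS, true_and, Bool.not_eq_true', List.any_eq_false, Bool.not_eq_true,
    Bool.and_eq_false_iff]
  constructor
  · intro h i hi
    have := h (scoreOf sv (n : Int) i) ((hmemS _).mpr ⟨i, hi, rfl⟩)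
    exact this
  · intro h u hu
    obtain ⟨i, hi, rfl⟩ := (hmemS u).mp hu
    exact h i hi

-- ---- bridging: under Pre_, A's dominance test equals B's score-tuple test ----

theorem dominates_eq_sdom (sv : List (Int × List Int)) (s_i : List Int) (i v : Int)
    (p q : List Int) (hp : List.lookup i sv = some p) (hq : List.lookup v sv = some q)
    (hlp : s_i.length ≤ p.length) (hlq : s_i.length ≤ q.length) :
    dominatesA sv s_i i v
      = (cgeB (s_i.length : Int) (scoreOf sv (s_i.length : Int) i) (scoreOf sv (s_i.length : Int) v)
          && decide (scoreOf sv (s_i.length : Int) i ≠ scoreOf sv (s_i.length : Int) v)) := by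
  set n := s_i.length with hn
  have hsi : scoreOf sv (n : Int) i = (List.range n).map (fun j => p.getD j 0) := by
    simp [scoreOf, hp, PySem.List.pyRange_zero_nat, List.map_map, Function.comp,
      PySem.List.pyGet?_natCast, List.getD]
  have hsv : scoreOf sv (n : Int) v = (List.range n).map (fun j => q.getD j 0) := by
    simp [scoreOf, hq, PySem.List.pyRange_zero_nat, List.map_map, Function.comp,
      PySem.List.pyGet?_natCast, List.getD]
  have hgetp : ∀ j < n, ∃ a, PySem.List.pyGet? p (j : Int) = some a ∧ a = p.getD j 0 := by
    intro j hj
    refine ⟨p[j], ?_, ?_⟩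
    · rw [PySem.List.pyGet?_natCast, List.getElem?_eq_getElem (by omega)]
    · rw [List.getD_eq_getElem?_getD, List.getElem?_eq_getElem (by omega)]; rfl
  have hgetq : ∀ j < n, ∃ a, PySem.List.pyGet? q (j : Int) = some a ∧ a = q.getD j 0 := by
    intro j hj
    refine ⟨q[j], ?_, ?_⟩
    · rw [PySem.List.pyGet?_natCast, List.getElem?_eq_getElem (by omega)]
    · rw [List.getD_eq_getElem?_getD, List.getElem?_eq_getElem (by omega)]; rfl
  -- the all-parts agree
  have hge : ((PySem.List.pyRange 0 (n : Int) 1).all (fun x => coordGe sv i v x))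
      = cgeB (n : Int) (scoreOf sv (n : Int) i) (scoreOf sv (n : Int) v) := by
    rw [Bool.eq_iff_iff, cgeB_iff]
    rw [PySem.List.pyRange_zero_nat, List.all_map, List.all_eq_true]
    simp only [Function.comp, List.mem_range]
    constructor
    · intro h j hj
      have := h j hj
      obtain ⟨a, ha, ha'⟩ := hgetp j hj
      obtain ⟨b, hb, hb'⟩ := hgetq j hj
      rw [hsi, hsv, PySem.List.getD_map_range _ _ _ _ hj, PySem.List.getD_map_range _ _ _ _ hj]
      simp only [coordGe, hp, hq, ha, hb, decide_eq_true_eq] at this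
      omega
    · intro h j hj
      have := h j hj
      rw [hsi, hsv, PySem.List.getD_map_range _ _ _ _ hj, PySem.List.getD_map_range _ _ _ _ hj] at this
      obtain ⟨a, ha, ha'⟩ := hgetp j hj
      obtain ⟨b, hb, hb'⟩ := hgetq j hj
      simp only [coordGe, hp, hq, ha, hb, decide_eq_true_eq]
      omega
  unfold dominatesA
  rw [← hn, hge]
  cases hall : cgeB (n : Int) (scoreOf sv (n : Int) i) (scoreOf sv (n : Int) v) with
  | false => simp
  | true =>
    simp only [Bool.true_and]
    -- under componentwise >=, 'some coordinate >' is 'the tuples differ'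
    rw [Bool.eq_iff_iff, decide_eq_true_iff]
    rw [PySem.List.pyRange_zero_nat, List.any_map, List.any_eq_true]
    simp only [Function.comp, List.mem_range]
    have hptw := (cgeB_iff n _ _).mp hall
    constructor
    · rintro ⟨j, hj, hgt⟩
      obtain ⟨a, ha, ha'⟩ := hgetp j hj
      obtain ⟨b, hb, hb'⟩ := hgetq j hj
      simp only [coordGt, hp, hq, ha, hb, decide_eq_true_eq] at hgt
      rw [hsi, hsv]
      intro he
      rw [List.map_inj_left] at he
      have := he j (List.mem_range.mpr hj)
      omega
    · intro hne
      rw [hsi, hsv] at hne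
      have : ¬ ∀ a ∈ List.range n, p.getD a 0 = q.getD a 0 := fun hc =>
        hne (List.map_inj_left.mpr hc)
      push Not at this
      obtain ⟨j, hjm, hne'⟩ := this
      have hj := List.mem_range.mp hjm
      refine ⟨j, hj, ?_⟩
      obtain ⟨a, ha, ha'⟩ := hgetp j hj
      obtain ⟨b, hb, hb'⟩ := hgetq j hj
      simp only [coordGt, hp, hq, ha, hb, decide_eq_true_eq]
      have := hptw j hj
      rw [hsi, hsv, PySem.List.getD_map_range _ _ _ _ hj, PySem.List.getD_map_range _ _ _ _ hj] at this
      omega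

theorem final_check (sv : List (Int × List Int)) (cand : List Int) (s_i : List Int)
    (hpre : cand = [] ∨ s_i = [] ∨
      (cand.all (fun i => ((List.lookup i sv).map
        (fun v => decide (s_i.length ≤ List.length v))).getD false)) = true) :
    remove_dom sv cand s_i = remove_dom_alt sv cand s_i := by
  rw [a_eq_filter, b_eq_filter]
  apply List.filter_congr
  intro v hv
  have hany : cand.any (fun i => dominatesA sv s_i i v)
      = cand.any (fun i =>
          cgeB (s_i.length : Int) (scoreOf sv (s_i.length : Int) i) (scoreOf sv (s_i.length : Int) v)
            && decide (scoreOf sv (s_i.length : Int) i ≠ scoreOf sv (s_i.length : Int) v)) := by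
    have hpt : ∀ i ∈ cand, dominatesA sv s_i i v
        = (cgeB (s_i.length : Int) (scoreOf sv (s_i.length : Int) i) (scoreOf sv (s_i.length : Int) v)
            && decide (scoreOf sv (s_i.length : Int) i ≠ scoreOf sv (s_i.length : Int) v)) := by
      intro i hi
      rcases hpre with h | h | h
      · simp [h] at hv
      · -- len(s_i) = 0: nothing dominates anything, on either side
        subst h
        have h0 : PySem.List.pyRange 0 ((0 : Int)) 1 = [] := by decide
        simp only [dominatesA, scoreOf, List.length_nil, Nat.cast_zero, h0,
          List.any_nil, Bool.and_false, List.map_nil, ne_eq, not_true_eq_false,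
          decide_false]
      · rw [List.all_eq_true] at h
        have hi' := h i hi
        have hv' := h v hv
        cases hpi : List.lookup i sv with
        | none => rw [hpi] at hi'; simp at hi'
        | some p =>
          cases hqv : List.lookup v sv with
          | none => rw [hqv] at hv'; simp at hv'
          | some q =>
            rw [hpi] at hi'; rw [hqv] at hv'
            simp only [Option.map_some, Option.getD_some, decide_eq_true_eq] at hi' hv'
            exact dominates_eq_sdom sv s_i i v p q hpi hqv hi' hv'
    rw [Bool.eq_iff_iff, List.any_eq_true, List.any_eq_true]
    constructor
    · rintro ⟨i, hi, hd⟩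
      exact ⟨i, hi, by rw [← hpt i hi]; exact hd⟩
    · rintro ⟨i, hi, hd⟩
      exact ⟨i, hi, by rw [hpt i hi]; exact hd⟩
  rw [hany]

-- ===== VERDICT (by name: the statement is the Claim_ definition above) =====
theorem remove_dom_spec : Claim_equal_remove_dom := by
  intro sv cand s_i _ hpre
  unfold Spec_remove_dom
  exact final_check sv cand s_i hpre
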